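-- pv_equiv track=rewrite | github.com/mozilla-ai/clawbolt | backend/app/agent/tool_summary.py | _truncate_block
-- ===== SOURCE A (Python) =====
-- _MAX_RECEIPTS_CHARS = 2000
--
-- def _truncate_block(lines: list[str]) -> str:
--     """Join receipt lines, falling back to a ``+K more`` suffix when the
--     block exceeds ``_MAX_RECEIPTS_CHARS``. The first receipts are kept
--     intact so the most recent action is still legible.
--     """
--     full = "\n".join(lines)
--     if len(full) <= _MAX_RECEIPTS_CHARS:
--         return full
--     kept: list[str] = []
--     running = 0
--     for idx, line in enumerate(lines):
--         suffix = f"\n(+{len(lines) - idx} more)"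
--         addition = (1 if kept else 0) + len(line)
--         if running + addition + len(suffix) > _MAX_RECEIPTS_CHARS:
--             return "\n".join(kept) + f"\n(+{len(lines) - idx} more)"
--         kept.append(line)
--         running += addition
--     return "\n".join(kept)
-- ===== SOURCE B (Python) =====
-- _MAX_RECEIPTS_CHARS = 2000
--
-- def _truncate_block(lines: list[str]) -> str:
--     full = "\n".join(lines)
--     if len(full) <= _MAX_RECEIPTS_CHARS:
--         return full
--     n = len(lines)
--     # prefix[i] = len("\n".join(lines[:i])): table built in one pass
--     prefix = [0]
--     for i, line in enumerate(lines):
--         prefix.append(prefix[i] + len(line) + (1 if i > 0 else 0))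
--     # first idx where kept block + suffix would overflow
--     for idx in range(n):
--         suffix = f"\n(+{n - idx} more)"
--         if prefix[idx + 1] + len(suffix) > _MAX_RECEIPTS_CHARS:
--             return "\n".join(lines[:idx]) + suffix
--     return full
-- ===== Notes on version B (the rewrite author's own statement) =====
-- stated objective: alternative
-- what changed: B first builds a prefix-length table of the joined block in one pass, then searches for the first cutoff index over range(n), instead of A's single loop that accumulates a running total and a kept list together.
import Mathlib
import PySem

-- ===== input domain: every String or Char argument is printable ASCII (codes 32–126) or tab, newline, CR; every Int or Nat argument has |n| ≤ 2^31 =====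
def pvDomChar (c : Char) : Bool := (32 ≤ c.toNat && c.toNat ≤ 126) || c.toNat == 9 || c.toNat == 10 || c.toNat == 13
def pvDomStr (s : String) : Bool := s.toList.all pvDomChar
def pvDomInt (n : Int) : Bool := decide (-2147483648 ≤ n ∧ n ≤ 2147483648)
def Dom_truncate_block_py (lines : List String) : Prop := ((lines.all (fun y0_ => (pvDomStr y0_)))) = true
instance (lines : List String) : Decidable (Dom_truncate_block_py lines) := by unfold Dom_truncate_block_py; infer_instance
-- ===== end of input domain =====

-- B replaces A's single accumulate-while-deciding loop by a prefix-length table plus a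
-- separate search for the first overflowing cutoff index (alternative decomposition, same cost).

def pyMaxReceiptsChars : Int := 2000

-- ===== PORT A =====
-- for idx, line in enumerate(lines): keep or return early with the "+K more" suffix
def truncAGo (n : Nat) : List (Int × String) → List String → Int → String
  | [], kept, _ => PySem.Str.join "\n" kept
  | (idx, line) :: rest, kept, running =>
    let suffix := "\n(+" ++ PySem.Int.toStr ((n : Int) - idx) ++ " more)"
    let addition := (if kept.isEmpty then 0 else 1) + PySem.Str.len line
    if running + addition + PySem.Str.len suffix > pyMaxReceiptsChars then
      PySem.Str.join "\n" kept ++ ("\n(+" ++ PySem.Int.toStr ((n : Int) - idx) ++ " more)")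
    else
      truncAGo n rest (kept ++ [line]) (running + addition)

def truncate_block_py (lines : List String) : String :=
  let full := PySem.Str.join "\n" lines
  if PySem.Str.len full ≤ pyMaxReceiptsChars then full
  else truncAGo lines.length (PySem.List.enumerate lines 0) [] 0

-- ===== PORT B =====
-- for i, line in enumerate(lines): prefix.append(prefix[i] + len(line) + (1 if i > 0 else 0))
def prefixTable : List Int → List (Int × String) → List Int
  | acc, [] => acc
  | acc, (i, line) :: rest =>
      prefixTable (acc ++ [PySem.List.pyGetD acc i 0 + PySem.Str.len line + (if i > 0 then 1 else 0)]) rest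

-- for idx in range(n): return at the first idx whose kept block + suffix overflows
def searchGo (n : Nat) (pfx : List Int) (lines : List String) (full : String) : List Int → String
  | [] => full
  | idx :: rest =>
      let suffix := "\n(+" ++ PySem.Int.toStr ((n : Int) - idx) ++ " more)"
      if PySem.List.pyGetD pfx (idx + 1) 0 + PySem.Str.len suffix > pyMaxReceiptsChars then
        PySem.Str.join "\n" (PySem.List.slice lines none (some idx)) ++ suffix
      else
        searchGo n pfx lines full rest

def truncate_block_py_alt (lines : List String) : String :=
  let full := PySem.Str.join "\n" lines
  if PySem.Str.len full ≤ pyMaxReceiptsChars then full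
  else
    let n := lines.length
    let pfx := prefixTable [0] (PySem.List.enumerate lines 0)
    searchGo n pfx lines full (PySem.List.pyRange 0 n 1)

-- ===== PRECONDITION & SPEC =====
def Spec_truncate_block_py (lines : List String) (out : String) : Prop := out = truncate_block_py_alt lines
instance (lines : List String) (out : String) : Decidable (Spec_truncate_block_py lines out) := by unfold Spec_truncate_block_py; infer_instance

-- ===== CLAIM (what is proved, stated in full; the proofs are below) =====
def Claim_equal_truncate_block_py : Prop := ∀ (lines : List String), Dom_truncate_block_py lines → Spec_truncate_block_py lines (truncate_block_py lines)

-- ===== LEMMAS AND PROOFS =====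

-- mathematical prefix lengths: pvP lines i = len("\n".join(lines[:i]))
def pvP (lines : List String) : Nat → Int
  | 0 => 0
  | i + 1 => pvP lines i + PySem.Str.len (lines.getD i "") + (if i > 0 then 1 else 0)

lemma drop_facts (lines : List String) (i : Nat) (line : String) (rest : List String)
    (hdrop : lines.drop i = line :: rest) :
    i < lines.length ∧ lines.getD i "" = line ∧ lines.drop (i+1) = rest := by
  have hlen := congrArg List.length hdrop
  simp at hlen
  have hi : i < lines.length := by omega
  refine ⟨hi, ?_, ?_⟩
  · have h0 : (lines.drop i).getD 0 "" = line := by rw [hdrop]; rfl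
    rw [List.getD_eq_getElem?_getD] at h0 ⊢
    rwa [List.getElem?_drop, Nat.add_zero] at h0
  · have : lines.drop (i+1) = (lines.drop i).drop 1 := by rw [List.drop_drop]
    rw [this, hdrop]; rfl

lemma prefixTable_spec (lines : List String) :
    ∀ (rest : List String) (i : Nat), lines.drop i = rest → i ≤ lines.length →
      prefixTable ((List.range (i + 1)).map (pvP lines)) (PySem.List.enumerate rest (i : Int))
        = (List.range (lines.length + 1)).map (pvP lines) := by
  intro rest
  induction rest with
  | nil =>
    intro i hdrop hle
    have hlen := congrArg List.length hdrop
    simp at hlen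
    have hi : i = lines.length := by omega
    subst hi
    simp [prefixTable, PySem.List.enumerate]
  | cons line rest ih =>
    intro i hdrop hle
    obtain ⟨hi, hline, hdrop'⟩ := drop_facts lines i line rest hdrop
    rw [PySem.List.enumerate_cons, prefixTable]
    have hget : PySem.List.pyGetD ((List.range (i + 1)).map (pvP lines)) (i : Int) 0 = pvP lines i := by
      rw [PySem.List.pyGetD_natCast]
      simp [List.getD_eq_getElem?_getD]
    have hstep : (List.range (i + 1)).map (pvP lines) ++
        [PySem.List.pyGetD ((List.range (i + 1)).map (pvP lines)) (i : Int) 0 + PySem.Str.len line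
          + (if (i : Int) > 0 then 1 else 0)] = (List.range (i + 1 + 1)).map (pvP lines) := by
      rw [hget, List.range_succ (n := i + 1), List.map_append]
      congr 1
      simp only [List.map_cons, List.map_nil, pvP, hline]
      congr 2
      split_ifs <;> simp_all
    rw [hstep]
    have := ih (i + 1) hdrop' (by omega)
    rw [← this]
    norm_num

lemma loop_eq (lines : List String) :
    ∀ (rest : List String) (idx : Nat), lines.drop idx = rest → idx ≤ lines.length →
      truncAGo lines.length (PySem.List.enumerate rest (idx : Int)) (lines.take idx) (pvP lines idx)
        = searchGo lines.length ((List.range (lines.length + 1)).map (pvP lines)) lines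
            (PySem.Str.join "\n" lines) (PySem.List.pyRange (idx : Int) (lines.length : Int) 1) := by
  intro rest
  induction rest with
  | nil =>
    intro idx hdrop hle
    have hlen := congrArg List.length hdrop
    simp at hlen
    have hi : idx = lines.length := by omega
    subst hi
    rw [PySem.List.pyRange_one_eq_nil (by omega)]
    simp [PySem.List.enumerate, truncAGo, searchGo]
  | cons line rest ih =>
    intro idx hdrop hle
    obtain ⟨hi, hline, hdrop'⟩ := drop_facts lines idx line rest hdrop
    rw [PySem.List.enumerate_cons, PySem.List.pyRange_one_cons (by exact_mod_cast hi)]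
    rw [truncAGo, searchGo]
    -- the prefix-table read is pvP lines (idx+1)
    have hget : PySem.List.pyGetD ((List.range (lines.length + 1)).map (pvP lines)) ((idx : Int) + 1) 0
        = pvP lines (idx + 1) := by
      have : ((idx : Int) + 1) = ((idx + 1 : Nat) : Int) := by push_cast; ring
      rw [this, PySem.List.pyGetD_natCast]
      simp [List.getD_eq_getElem?_getD, List.getElem?_map, List.getElem?_range (by omega : idx + 1 < lines.length + 1)]
    -- the two overflow conditions agree
    have hrun : pvP lines idx + ((if (lines.take idx).isEmpty then 0 else 1) + PySem.Str.len line)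
        = pvP lines (idx + 1) := by
      have hempty : (lines.take idx).isEmpty = decide (idx = 0) := by
        rcases Nat.eq_zero_or_pos idx with h | h
        · subst h; simp
        · rw [decide_eq_false (by omega : ¬ idx = 0)]
          simp only [List.isEmpty_eq_false_iff, ne_eq, List.take_eq_nil_iff, not_or]
          exact ⟨by omega, by rintro rfl; simp at hi⟩
      rw [hempty]
      simp only [pvP, hline]
      rcases Nat.eq_zero_or_pos idx with h | h <;> simp [h]
      omega
    rw [hget, hrun]
    split_ifs with hcond
    · -- both return kept ++ suffix
      rw [PySem.List.slice_to, Int.toNat_natCast]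
      positivity
    · -- recurse
      have htake : lines.take idx ++ [line] = lines.take (idx + 1) := by
        rw [List.take_add_one]
        congr 1
        rw [← hline, List.getD_eq_getElem?_getD]
        cases h : lines[idx]? with
        | none => simp [] at h; omega
        | some v => simp
      have hcast : (idx : Int) + 1 = ((idx + 1 : Nat) : Int) := by push_cast; ring
      rw [htake, hcast]
      exact ih (idx + 1) hdrop' (by omega)

-- ===== VERDICT (by name: the statement is the Claim_ definition above) =====
theorem truncate_block_py_spec : Claim_equal_truncate_block_py := by
  intro lines _
  unfold Spec_truncate_block_py truncate_block_py truncate_block_py_alt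
  dsimp only
  split_ifs with h
  · rfl
  ·
    have h0 : ([0] : List Int) = (List.range 1).map (pvP lines) := by
      simp [pvP]
    have htab : prefixTable [0] (PySem.List.enumerate lines 0)
        = (List.range (lines.length + 1)).map (pvP lines) := by
      rw [h0]
      have := prefixTable_spec lines lines 0 rfl (by omega)
      simpa using this
    have hloop := loop_eq lines lines 0 rfl (by omega)
    simp only [List.take_zero, Nat.cast_zero] at hloop
    rw [htab]
    simpa [pvP] using hloop
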